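-- pv_equiv track=rewrite | github.com/tharaksreeram10/Cryptography- | qno 5-ceaser tp plain.py | affine_caesar
-- ===== SOURCE A (Python) =====
-- def affine_caesar(text, a, b, encrypt=True):
--     result = ""
--
--     for char in text:
--         if char.isalpha():
--             shift = ord('A') if char.isupper() else ord('a')
--             char_num = ord(char) - shift
--             if encrypt:
--                 new_char_num = (a * char_num + b) % 26
--             else:
--                 a_inverse = None
--                 for i in range(26):
--                     if (a * i) % 26 == 1:
--                         a_inverse = i
--                         break
--                 if a_inverse is None:
--                     return "Decryption not possible with this 'a' value."
--                 new_char_num = (a_inverse * (char_num - b)) % 26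
--             result += chr(new_char_num + shift)
--         else:
--             result += char
--
--     return result
-- ===== SOURCE B (Python) =====
-- def affine_caesar(text, a, b, encrypt=True):
--     if encrypt:
--         f = lambda x: (a * x + b) % 26
--     else:
--         a_inv = next((i for i in range(26) if (a * i) % 26 == 1), None)
--         if a_inv is None:
--             return "Decryption not possible with this 'a' value."
--         f = lambda x: (a_inv * (x - b)) % 26
--     up = [chr(65 + f(x)) for x in range(26)]
--     low = [chr(97 + f(x)) for x in range(26)]
--     return ''.join(up[ord(c) - 65] if c.isupper()
--                    else low[ord(c) - 97] if c.islower()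
--                    else c
--                    for c in text)
-- ===== Notes on version B (the rewrite author's own statement) =====
-- stated objective: idiomatic
-- what changed: B computes the modular inverse once and builds two 26-letter translation tables up front, then translates the text in a single table-lookup pass, instead of A's per-character affine arithmetic that re-runs the 26-step inverse search for every letter when decrypting.
-- intended difference: When decrypting with a non-invertible 'a' and a text containing no letters, A returns the text unchanged (its error check is only reached lazily at the first letter) while B returns the error string 'Decryption not possible with this \'a\' value.', which is the intended eager report that decryption is impossible for this 'a'. — e.g. on affine_caesar(".", 2, 0, false): A returns ".", B returns "Decryption not possible with this 'a' value."
import Mathlib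
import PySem

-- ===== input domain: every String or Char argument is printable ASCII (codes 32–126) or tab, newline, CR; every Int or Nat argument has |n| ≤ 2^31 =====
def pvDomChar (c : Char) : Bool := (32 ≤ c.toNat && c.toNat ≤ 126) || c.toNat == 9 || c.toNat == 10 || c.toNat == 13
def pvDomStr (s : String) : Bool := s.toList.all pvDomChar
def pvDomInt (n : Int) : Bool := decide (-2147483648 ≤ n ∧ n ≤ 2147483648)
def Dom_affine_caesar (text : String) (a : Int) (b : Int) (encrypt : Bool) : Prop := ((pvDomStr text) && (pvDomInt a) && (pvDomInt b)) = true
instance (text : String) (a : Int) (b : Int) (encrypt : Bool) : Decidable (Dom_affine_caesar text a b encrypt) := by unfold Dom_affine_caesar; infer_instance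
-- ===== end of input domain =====

-- B replaces A's per-character arithmetic (inverse search re-run for every letter) by one
-- inverse search plus two precomputed 26-letter translation tables; equal on Dom except the
-- D_ corner, where B reports the non-invertible 'a' eagerly.

-- ===== PORT A =====
-- inner loop "for i in range(26): if (a*i)%26==1: a_inverse=i; break" (re-run per character in A)
def affineA_inv (a : Int) : List Int → Option Int
  | [] => none
  | i :: rest => if PySem.Int.mod (a * i) 26 == 1 then some i else affineA_inv a rest

-- the main for-loop over text, accumulating result; the early "return" on a missing inverse
-- is the error-string branch.  chr/ord are Char.ofNat/Char.toNat (exact: 0 ≤ (…)%26 < 26, so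
-- every produced code point is a valid ASCII letter code).
def affineA_go (a b : Int) (encrypt : Bool) (result : List Char) : List Char → String
  | [] => String.ofList result
  | c :: rest =>
    if PySem.Chars.isalpha c then
      let shift : Int := if PySem.Chars.isupper c then 65 else 97
      let charNum : Int := (c.toNat : Int) - shift
      if encrypt then
        affineA_go a b encrypt (result ++ [Char.ofNat (PySem.Int.mod (a * charNum + b) 26 + shift).toNat]) rest
      else
        match affineA_inv a (PySem.List.pyRange 0 26 1) with
        | none => "Decryption not possible with this 'a' value."
        | some a_inverse =>
            affineA_go a b encrypt (result ++ [Char.ofNat (PySem.Int.mod (a_inverse * (charNum - b)) 26 + shift).toNat]) rest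
    else affineA_go a b encrypt (result ++ [c]) rest

def affine_caesar (text : String) (a : Int) (b : Int) (encrypt : Bool) : String :=
  affineA_go a b encrypt [] text.toList

-- ===== PORT B =====
-- next((i for i in range(26) if (a*i)%26 == 1), None)
def affineB_inv (a : Int) : Option Int :=
  (PySem.List.pyRange 0 26 1).find? (fun i => PySem.Int.mod (a * i) 26 == 1)

-- per-character table lookup: up[ord(c)-65] / low[ord(c)-97] / c.  The Python index is always
-- in range when the guard holds, so pyGetD with default c is exact.
def affineB_tr (up low : List Char) (c : Char) : Char :=
  if PySem.Chars.isupper c then PySem.List.pyGetD up ((c.toNat : Int) - 65) c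
  else if PySem.Chars.islower c then PySem.List.pyGetD low ((c.toNat : Int) - 97) c
  else c

-- build the two 26-letter tables once, then translate in one pass
def affineB_translate (f : Int → Int) (cs : List Char) : String :=
  let up := (PySem.List.pyRange 0 26 1).map (fun x => Char.ofNat (65 + f x).toNat)
  let low := (PySem.List.pyRange 0 26 1).map (fun x => Char.ofNat (97 + f x).toNat)
  String.ofList (cs.map (affineB_tr up low))

def affine_caesar_alt (text : String) (a : Int) (b : Int) (encrypt : Bool) : String :=
  if encrypt then
    affineB_translate (fun x => PySem.Int.mod (a * x + b) 26) text.toList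
  else
    match affineB_inv a with
    | none => "Decryption not possible with this 'a' value."
    | some a_inv => affineB_translate (fun x => PySem.Int.mod (a_inv * (x - b)) 26) text.toList

-- ===== PRECONDITION & SPEC =====
-- On decryption with a non-invertible 'a' and a text containing no letters, A returns the text
-- unchanged (its error check is only reached lazily at the first letter) while B returns the
-- error string, the intended eager report that decryption is impossible for this 'a'.
def D_affine_caesar (text : String) (a : Int) (b : Int) (encrypt : Bool) : Prop :=
  encrypt = false ∧
  ((PySem.List.pyRange 0 26 1).all (fun i => !(PySem.Int.mod (a * i) 26 == 1)) = true) ∧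
  (text.toList.all (fun c => !PySem.Chars.isalpha c) = true)
instance (text : String) (a : Int) (b : Int) (encrypt : Bool) : Decidable (D_affine_caesar text a b encrypt) := by unfold D_affine_caesar; infer_instance

def Spec_affine_caesar (text : String) (a : Int) (b : Int) (encrypt : Bool) (out : String) : Prop := ¬ D_affine_caesar text a b encrypt → out = affine_caesar_alt text a b encrypt
instance (text : String) (a : Int) (b : Int) (encrypt : Bool) (out : String) : Decidable (Spec_affine_caesar text a b encrypt out) := by unfold Spec_affine_caesar; infer_instance

def pvDiffWitness_affine_caesar : String × Int × Int × Bool := (".", 2, 0, false)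
def pvDiffWitnessOut_affine_caesar : String × String := (".", "Decryption not possible with this 'a' value.")

-- ===== CLAIM (what is proved, stated in full; the proofs are below) =====
def Claim_unchanged_affine_caesar : Prop := ∀ (text : String) (a : Int) (b : Int) (encrypt : Bool), Dom_affine_caesar text a b encrypt → Spec_affine_caesar text a b encrypt (affine_caesar text a b encrypt)
def Claim_changed_affine_caesar : Prop := Dom_affine_caesar (pvDiffWitness_affine_caesar.1) (pvDiffWitness_affine_caesar.2.1) (pvDiffWitness_affine_caesar.2.2.1) (pvDiffWitness_affine_caesar.2.2.2) ∧ D_affine_caesar (pvDiffWitness_affine_caesar.1) (pvDiffWitness_affine_caesar.2.1) (pvDiffWitness_affine_caesar.2.2.1) (pvDiffWitness_affine_caesar.2.2.2) ∧ affine_caesar (pvDiffWitness_affine_caesar.1) (pvDiffWitness_affine_caesar.2.1) (pvDiffWitness_affine_caesar.2.2.1) (pvDiffWitness_affine_caesar.2.2.2) = pvDiffWitnessOut_affine_caesar.1 ∧ affine_caesar_alt (pvDiffWitness_affine_caesar.1) (pvDiffWitness_affine_caesar.2.1) (pvDiffWitness_affine_caesar.2.2.1) (pvDiffWitness_affine_caesar.2.2.2)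 = pvDiffWitnessOut_affine_caesar.2 ∧ pvDiffWitnessOut_affine_caesar.1 ≠ pvDiffWitnessOut_affine_caesar.2
def Claim_exact_affine_caesar : Prop := ∀ (text : String) (a : Int) (b : Int) (encrypt : Bool), Dom_affine_caesar text a b encrypt → D_affine_caesar text a b encrypt → affine_caesar text a b encrypt ≠ affine_caesar_alt text a b encrypt

-- ===== LEMMAS AND PROOFS =====

-- A's break-search equals List.find? on the same range
theorem affineA_inv_eq_find? (a : Int) (l : List Int) :
    affineA_inv a l = l.find? (fun i => PySem.Int.mod (a * i) 26 == 1) := by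
  induction l with
  | nil => rfl
  | cons i rest ih =>
      by_cases h : (PySem.Int.mod (a * i) 26 == 1) = true
      · rw [show List.find? (fun i => PySem.Int.mod (a * i) 26 == 1) (i :: rest) = some i from
          List.find?_cons_of_pos h]
        simp only [affineA_inv, if_pos h]
      · rw [show List.find? (fun i => PySem.Int.mod (a * i) 26 == 1) (i :: rest) =
            List.find? (fun i => PySem.Int.mod (a * i) 26 == 1) rest from
          List.find?_cons_of_neg (by simpa using h)]
        simp only [affineA_inv, if_neg h, ih]

-- indexing the mapped range table returns the mapped value
theorem pyGetD_table (f : Int → Char) (k : Nat) (h : k < 26) (d : Char) :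
    PySem.List.pyGetD ((PySem.List.pyRange 0 26 1).map f) ((k : Int)) d = f k := by
  have := PySem.List.pyGetD_map_pyRange f 26 k d h
  norm_num at this ⊢
  exact this

-- the per-character lookup equals A's per-character formula
theorem affineB_tr_eq (f : Int → Int) (c : Char) :
    affineB_tr ((PySem.List.pyRange 0 26 1).map (fun x => Char.ofNat (65 + f x).toNat))
               ((PySem.List.pyRange 0 26 1).map (fun x => Char.ofNat (97 + f x).toNat)) c =
    (if PySem.Chars.isalpha c then
      Char.ofNat (f ((c.toNat : Int) - (if PySem.Chars.isupper c then (65:Int) else 97)) +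
                  (if PySem.Chars.isupper c then (65:Int) else 97)).toNat
     else c) := by
  by_cases hU : PySem.Chars.isupper c
  · have hb : 65 ≤ c.toNat ∧ c.toNat ≤ 90 := by
      simp only [PySem.Chars.isupper, Bool.and_eq_true, decide_eq_true_eq] at hU
      obtain ⟨h1, h2⟩ := hU
      rw [Char.le_def] at h1 h2
      rw [UInt32.le_iff_toNat_le] at h1 h2
      exact ⟨h1, h2⟩
    have hU' : PySem.Chars.isupper c = true := by
      simp [PySem.Chars.isupper, Char.le_def, UInt32.le_iff_toNat_le]; omega
    have hk : ((c.toNat : Int) - 65) = ((c.toNat - 65 : Nat) : Int) := by omega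
    have halpha : PySem.Chars.isalpha c = true := by simp [PySem.Chars.isalpha, hU']
    simp only [affineB_tr, hU', halpha, if_true, hk]
    rw [pyGetD_table _ _ (by omega)]
    rw [Int.add_comm]
  · have hU' : PySem.Chars.isupper c = false := by simpa using hU
    by_cases hL : PySem.Chars.islower c
    · have hb : 97 ≤ c.toNat ∧ c.toNat ≤ 122 := by
        simp only [PySem.Chars.islower, Bool.and_eq_true, decide_eq_true_eq] at hL
        obtain ⟨h1, h2⟩ := hL
        rw [Char.le_def] at h1 h2
        rw [UInt32.le_iff_toNat_le] at h1 h2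
        exact ⟨h1, h2⟩
      have hL' : PySem.Chars.islower c = true := by
        simp [PySem.Chars.islower, Char.le_def, UInt32.le_iff_toNat_le]; omega
      have hk : ((c.toNat : Int) - 97) = ((c.toNat - 97 : Nat) : Int) := by omega
      have halpha : PySem.Chars.isalpha c = true := by simp [PySem.Chars.isalpha, hL']
      simp only [affineB_tr, hU', hL', halpha, Bool.false_eq_true, if_false, if_true, hk]
      rw [pyGetD_table _ _ (by omega)]
      rw [Int.add_comm]
    · have hL' : PySem.Chars.islower c = false := by simpa using hL
      have halpha : PySem.Chars.isalpha c = false := by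
        simp [PySem.Chars.isalpha, hU', hL']
      simp [affineB_tr, hU', hL', halpha]

-- A's loop in the encrypt branch builds B's mapped output
theorem affineA_go_encrypt (a b : Int) (cs : List Char) (acc : List Char) :
    affineA_go a b true acc cs =
      String.ofList (acc ++ cs.map (affineB_tr
        ((PySem.List.pyRange 0 26 1).map (fun x => Char.ofNat (65 + PySem.Int.mod (a * x + b) 26).toNat))
        ((PySem.List.pyRange 0 26 1).map (fun x => Char.ofNat (97 + PySem.Int.mod (a * x + b) 26).toNat)))) := by
  induction cs generalizing acc with
  | nil => simp [affineA_go]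
  | cons c rest ih =>
      rw [List.map_cons]
      rw [affineB_tr_eq]
      by_cases hA : PySem.Chars.isalpha c
      · simp only [affineA_go, hA, if_true, ih]
        simp
      · simp only [affineA_go, hA, if_false, Bool.false_eq_true, ih]
        simp

-- A's loop in the decrypt branch, when the inverse exists
theorem affineA_go_decrypt (a b a_inv : Int)
    (h : affineA_inv a (PySem.List.pyRange 0 26 1) = some a_inv)
    (cs : List Char) (acc : List Char) :
    affineA_go a b false acc cs =
      String.ofList (acc ++ cs.map (affineB_tr
        ((PySem.List.pyRange 0 26 1).map (fun x => Char.ofNat (65 + PySem.Int.mod (a_inv * (x - b)) 26).toNat))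
        ((PySem.List.pyRange 0 26 1).map (fun x => Char.ofNat (97 + PySem.Int.mod (a_inv * (x - b)) 26).toNat)))) := by
  induction cs generalizing acc with
  | nil => simp [affineA_go]
  | cons c rest ih =>
      rw [List.map_cons]
      rw [affineB_tr_eq]
      by_cases hA : PySem.Chars.isalpha c
      · simp only [affineA_go, hA, if_true, h, ih]
        simp
      · simp only [affineA_go, hA, if_false, Bool.false_eq_true, ih]
        simp

-- A's loop in the decrypt branch, when no inverse exists: error iff a letter is reached
theorem affineA_go_none (a b : Int)
    (h : affineA_inv a (PySem.List.pyRange 0 26 1) = none)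
    (cs : List Char) (acc : List Char) :
    affineA_go a b false acc cs =
      (if cs.any PySem.Chars.isalpha then "Decryption not possible with this 'a' value."
       else String.ofList (acc ++ cs)) := by
  induction cs generalizing acc with
  | nil => simp [affineA_go]
  | cons c rest ih =>
      by_cases hA : PySem.Chars.isalpha c
      · simp only [affineA_go, hA, if_true, h]
        simp [hA]
      · simp only [affineA_go, hA, if_false, Bool.false_eq_true, ih]
        simp [hA]

-- D_ unpacked into propositional form
theorem D_iff (text : String) (a b : Int) (encrypt : Bool) :
    D_affine_caesar text a b encrypt ↔
      (encrypt = false ∧ (∀ i ∈ PySem.List.pyRange 0 26 1, ¬ PySem.Int.mod (a * i) 26 = 1) ∧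
       (∀ c ∈ text.toList, ¬ PySem.Chars.isalpha c = true)) := by
  unfold D_affine_caesar
  simp [List.all_eq_true]

-- B's find? returns none exactly on D_'s no-inverse condition
theorem affineB_inv_none_iff (a : Int) :
    affineB_inv a = none ↔ (∀ i ∈ PySem.List.pyRange 0 26 1, ¬ PySem.Int.mod (a * i) 26 = 1) := by
  unfold affineB_inv
  rw [List.find?_eq_none]
  simp

-- ===== VERDICT (by name: the statement is the Claim_ definition above) =====
theorem affine_caesar_spec : Claim_unchanged_affine_caesar := by
  intro text a b encrypt _ hnD
  unfold affine_caesar affine_caesar_alt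
  cases encrypt with
  | true =>
      simp only [if_true]
      rw [affineA_go_encrypt]
      simp [affineB_translate]
  | false =>
      simp only [Bool.false_eq_true, if_false]
      have hinv := affineA_inv_eq_find? a (PySem.List.pyRange 0 26 1)
      cases hB : affineB_inv a with
      | none =>
          have h : affineA_inv a (PySem.List.pyRange 0 26 1) = none := by
            rw [hinv]; exact hB
          rw [affineA_go_none a b h]
          have hnoinv := (affineB_inv_none_iff a).mp hB
          have hany : text.toList.any PySem.Chars.isalpha = true := by
            by_contra hna
            refine hnD ((D_iff _ _ _ _).mpr ⟨rfl, hnoinv, ?_⟩)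
            intro c hc hal
            exact hna (List.any_eq_true.mpr ⟨c, hc, hal⟩)
          simp [hany]
      | some a_inv =>
          have h : affineA_inv a (PySem.List.pyRange 0 26 1) = some a_inv := by
            rw [hinv]; exact hB
          rw [affineA_go_decrypt a b a_inv h]
          simp [affineB_translate]

theorem affine_caesar_changed : Claim_changed_affine_caesar := by
  unfold Claim_changed_affine_caesar; decide

theorem affine_caesar_tight : Claim_exact_affine_caesar := by
  intro text a b encrypt _ hD
  obtain ⟨he, hnoinv, hnoalpha⟩ := (D_iff _ _ _ _).mp hD
  subst he
  have h : affineA_inv a (PySem.List.pyRange 0 26 1) = none := by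
    rw [affineA_inv_eq_find?]
    exact (affineB_inv_none_iff a).mpr hnoinv
  have hB : affineB_inv a = none := (affineB_inv_none_iff a).mpr hnoinv
  have hany : text.toList.any PySem.Chars.isalpha = false := by
    simp only [List.any_eq_false]
    intro c hc; exact hnoalpha c hc
  unfold affine_caesar affine_caesar_alt
  simp only [Bool.false_eq_true, if_false, hB]
  rw [affineA_go_none a b h]
  simp only [hany, Bool.false_eq_true, if_false, List.nil_append]
  intro heq
  rw [String.ofList_toList] at heq
  have := hnoalpha 'D' (by rw [heq]; decide)
  exact this (by decide)
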